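-- pv_equiv track=rewrite | github.com/futoke/mpu6050-qt | test.py | fill_coords_queue
-- ===== SOURCE A (Python) =====
-- CHUNK_SIZE = 100
--
-- def fill_coords_queue(coords: list) -> list:
--
--     """
--
--     :param coords:
--     :return:
--     """
--     coords_queue = [[c[0]] for c in coords]
--
--     for (begin_coord, end_coord), queue_item in zip(coords, coords_queue):
--         if end_coord - begin_coord > 0:
--             while queue_item[-1] < end_coord:
--                 if end_coord - queue_item[-1] < CHUNK_SIZE:
--                     queue_item += [end_coord]
--                 else:
--                     queue_item += [queue_item[-1] + CHUNK_SIZE]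
--         else:
--             while queue_item[-1] > end_coord:
--                 if queue_item[-1] - end_coord < CHUNK_SIZE:
--                     queue_item += [end_coord]
--                 else:
--                     queue_item += [queue_item[-1] - CHUNK_SIZE]
--
--     max_len = max(map(len, coords_queue))
--
--     for queue_item in coords_queue:
--         queue_item_len = len(queue_item)
--         if queue_item_len < max_len:
--             queue_item += (max_len - queue_item_len) * [queue_item[-1]]
--
--     return zip(*coords_queue)
-- ===== SOURCE B (Python) =====
-- CHUNK_SIZE = 100
--
-- def fill_coords_queue(coords: list) -> list:
--     max_len = max((abs(e - b) + CHUNK_SIZE - 1) // CHUNK_SIZE + 1 for b, e in coords)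
--     cols = [[min(b + i * CHUNK_SIZE, e) if e >= b else max(b - i * CHUNK_SIZE, e)
--              for i in range(max_len)]
--             for b, e in coords]
--     return zip(*cols)
-- ===== Notes on version B (the rewrite author's own statement) =====
-- stated objective: simpler
-- what changed: Replaces the per-coordinate while-loop stepping plus a separate padding pass with a single closed-form clamp: max_len is computed by ceiling division up front and each column is one list comprehension min/max-clamping b +/- i*CHUNK_SIZE at end, which yields the stepping and the padding in one shot.
import Mathlib
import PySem

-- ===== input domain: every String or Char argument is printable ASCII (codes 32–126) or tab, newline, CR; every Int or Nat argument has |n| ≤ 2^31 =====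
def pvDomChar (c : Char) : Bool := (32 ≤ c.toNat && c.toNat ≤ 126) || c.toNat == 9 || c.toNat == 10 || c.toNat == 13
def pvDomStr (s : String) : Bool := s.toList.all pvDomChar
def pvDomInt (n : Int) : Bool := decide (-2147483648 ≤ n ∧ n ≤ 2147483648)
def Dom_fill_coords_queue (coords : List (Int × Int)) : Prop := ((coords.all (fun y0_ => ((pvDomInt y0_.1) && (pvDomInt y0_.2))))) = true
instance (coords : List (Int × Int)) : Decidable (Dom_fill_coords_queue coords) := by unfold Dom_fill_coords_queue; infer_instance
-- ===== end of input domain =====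

-- B replaces A's per-coordinate while-loop stepping plus a separate padding pass by a
-- closed-form clamp over a precomputed common length (objective: simpler, same cost).

-- shared tail: Python's zip(*cols) (truncating zip over the columns), used by both ports
def pyZipStar : List (List Int) → List (List Int)
  | [] => []
  | c :: cs =>
    if h : (c :: cs).any (fun x => x.isEmpty) then []
    else ((c :: cs).map (fun x => x.headD 0)) :: pyZipStar ((c :: cs).map (fun x => x.tail))
termination_by cols => (cols.headD []).length
decreasing_by
  simp only [List.any_cons, Bool.or_eq_true, not_or] at h
  simp only [List.map_cons, List.headD_cons, List.length_tail]
  have hc : c ≠ [] := by simpa [List.isEmpty_iff] using h.1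
  have : 0 < c.length := List.length_pos_iff.mpr hc
  omega

-- ===== PORT A =====
-- while queue_item[-1] < end_coord: append end_coord or last+CHUNK_SIZE (the current
-- last element queue_item[-1] is carried as the explicit parameter `last`)
def fcqGrowUp (e : Int) (item : List Int) (last : Int) : List Int :=
  if _h : last < e then
    if e - last < 100 then fcqGrowUp e (item ++ [e]) e
    else fcqGrowUp e (item ++ [last + 100]) (last + 100)
  else item
termination_by (e - last).toNat
decreasing_by all_goals omega

-- while queue_item[-1] > end_coord: append end_coord or last-CHUNK_SIZE
def fcqGrowDown (e : Int) (item : List Int) (last : Int) : List Int :=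
  if _h : last > e then
    if last - e < 100 then fcqGrowDown e (item ++ [e]) e
    else fcqGrowDown e (item ++ [last - 100]) (last - 100)
  else item
termination_by (last - e).toNat
decreasing_by all_goals omega

def fill_coords_queue (coords : List (Int × Int)) : List (List Int) :=
  let coords_queue := coords.map (fun c => [c.1])
  let coords_queue := List.zipWith (fun p item =>
      if p.2 - p.1 > 0 then fcqGrowUp p.2 item (PySem.List.pyGetD item (-1) 0)
      else fcqGrowDown p.2 item (PySem.List.pyGetD item (-1) 0)) coords coords_queue
  -- max(map(len, coords_queue)); getD 0 unreachable under Pre_ (coords ≠ [])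
  let max_len : Int := (PySem.List.max? (coords_queue.map (fun q => PySem.List.len q)) (fun x => x)).getD 0
  let coords_queue := coords_queue.map (fun q =>
      if PySem.List.len q < max_len then
        q ++ List.replicate (max_len - PySem.List.len q).toNat (PySem.List.pyGetD q (-1) 0)
      else q)
  pyZipStar coords_queue

-- ===== PORT B =====
def fill_coords_queue_alt (coords : List (Int × Int)) : List (List Int) :=
  -- max_len = max((abs(e - b) + CHUNK_SIZE - 1) // CHUNK_SIZE + 1 for b, e in coords)
  let max_len : Int := (PySem.List.max?
      (coords.map (fun p => PySem.Int.floordiv ((↑(p.2 - p.1).natAbs : Int) + 100 - 1) 100 + 1))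
      (fun x => x)).getD 0
  let cols := coords.map (fun p => (PySem.List.pyRange 0 max_len 1).map (fun i =>
      if p.2 ≥ p.1 then min (p.1 + i * 100) p.2 else max (p.1 - i * 100) p.2))
  pyZipStar cols

-- ===== PRECONDITION & SPEC =====
-- Pre_ excludes exactly the empty list, where Python A raises ValueError (max() of an
-- empty sequence); B's Python raises there too.
def Pre_fill_coords_queue (coords : List (Int × Int)) : Prop := coords ≠ []
instance (coords : List (Int × Int)) : Decidable (Pre_fill_coords_queue coords) := by unfold Pre_fill_coords_queue; infer_instance
def pvWitness_fill_coords_queue : (List (Int × Int)) := [(0, 250), (300, 40)]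

def Spec_fill_coords_queue (coords : List (Int × Int)) (out : List (List Int)) : Prop := out = fill_coords_queue_alt coords
instance (coords : List (Int × Int)) (out : List (List Int)) : Decidable (Spec_fill_coords_queue coords out) := by unfold Spec_fill_coords_queue; infer_instance

-- ===== CLAIM (what is proved, stated in full; the proofs are below) =====
def Claim_equal_fill_coords_queue : Prop := ∀ (coords : List (Int × Int)), Dom_fill_coords_queue coords → Pre_fill_coords_queue coords → Spec_fill_coords_queue coords (fill_coords_queue coords)

-- ===== LEMMAS AND PROOFS =====

-- output length of one coordinate pair: ceil(|e-b|/100) + 1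
def fcqL (b e : Int) : Nat := ((e - b).natAbs + 99) / 100 + 1

-- the column entry as A's branch condition selects it
def fcqFA (b e : Int) (i : Nat) : Int :=
  if e - b > 0 then min (b + (i : Int) * 100) e else max (b - (i : Int) * 100) e

-- the column entry as B's branch condition selects it
def fcqFB (b e : Int) (i : Nat) : Int :=
  if e ≥ b then min (b + (i : Int) * 100) e else max (b - (i : Int) * 100) e

lemma fcqFA_eq_fcqFB (b e : Int) (i : Nat) : fcqFA b e i = fcqFB b e i := by
  unfold fcqFA fcqFB
  by_cases h1 : e - b > 0 <;> by_cases h2 : e ≥ b <;> simp only [h1, h2, if_true, if_false] <;> omega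

lemma fcqGrowUp_char (e : Int) : ∀ (n : Nat) (item : List Int) (b : Int), b ≤ e → (e - b).toNat = n →
    fcqGrowUp e item b = item ++ (List.range' 1 ((n + 99) / 100)).map (fun i : Nat => min (b + (i : Int) * 100) e) := by
  intro n
  induction n using Nat.strong_induction_on with
  | _ n ih =>
    intro item b hbe hn
    rw [fcqGrowUp]
    by_cases hlt : b < e
    · rw [dif_pos hlt]
      by_cases hsm : e - b < 100
      · rw [if_pos hsm, ih 0 (by omega) (item ++ [e]) e le_rfl (by omega)]
        have hk : (n + 99) / 100 = 1 := by omega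
        rw [hk]
        have h0 : List.range' 1 ((0 + 99) / 100) = [] := rfl
        have h1 : List.range' 1 1 = [1] := rfl
        rw [h0, h1]
        simp only [List.map_cons, List.map_nil, Nat.cast_one, List.append_nil]
        have hmin : min (b + (1 : Int) * 100) e = e := by omega
        rw [hmin]
      · rw [if_neg hsm, ih (n - 100) (by omega) (item ++ [b + 100]) (b + 100) (by omega) (by omega)]
        have hk : (n + 99) / 100 = (n - 100 + 99) / 100 + 1 := by omega
        rw [hk]
        have hr : List.range' 1 ((n - 100 + 99) / 100 + 1) = 1 :: List.range' 2 ((n - 100 + 99) / 100) := by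
          simp [List.range']
        rw [hr]
        simp only [List.map_cons, Nat.cast_one, List.append_assoc, List.cons_append, List.nil_append]
        have hmin : min (b + (1 : Int) * 100) e = b + 100 := by omega
        rw [hmin]
        congr 1
        rw [List.range'_eq_map_range, List.range'_eq_map_range, List.map_map, List.map_map]
        congr 1
        apply List.map_congr_left
        intro j _
        simp only [Function.comp_apply]
        congr 1
        push_cast
        ring
    · rw [dif_neg hlt]
      have h0 : n = 0 := by omega
      subst h0
      have h00 : List.range' 1 ((0 + 99) / 100) = [] := rfl
      rw [h00]
      simp

lemma fcqGrowDown_char (e : Int) : ∀ (n : Nat) (item : List Int) (b : Int), e ≤ b → (b - e).toNat = n →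
    fcqGrowDown e item b = item ++ (List.range' 1 ((n + 99) / 100)).map (fun i : Nat => max (b - (i : Int) * 100) e) := by
  intro n
  induction n using Nat.strong_induction_on with
  | _ n ih =>
    intro item b hbe hn
    rw [fcqGrowDown]
    by_cases hlt : b > e
    · rw [dif_pos hlt]
      by_cases hsm : b - e < 100
      · rw [if_pos hsm, ih 0 (by omega) (item ++ [e]) e le_rfl (by omega)]
        have hk : (n + 99) / 100 = 1 := by omega
        rw [hk]
        have h0 : List.range' 1 ((0 + 99) / 100) = [] := rfl
        have h1 : List.range' 1 1 = [1] := rfl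
        rw [h0, h1]
        simp only [List.map_cons, List.map_nil, Nat.cast_one, List.append_nil]
        have hmax : max (b - (1 : Int) * 100) e = e := by omega
        rw [hmax]
      · rw [if_neg hsm, ih (n - 100) (by omega) (item ++ [b - 100]) (b - 100) (by omega) (by omega)]
        have hk : (n + 99) / 100 = (n - 100 + 99) / 100 + 1 := by omega
        rw [hk]
        have hr : List.range' 1 ((n - 100 + 99) / 100 + 1) = 1 :: List.range' 2 ((n - 100 + 99) / 100) := by
          simp [List.range']
        rw [hr]
        simp only [List.map_cons, Nat.cast_one, List.append_assoc, List.cons_append, List.nil_append]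
        have hmax : max (b - (1 : Int) * 100) e = b - 100 := by omega
        rw [hmax]
        congr 1
        rw [List.range'_eq_map_range, List.range'_eq_map_range, List.map_map, List.map_map]
        congr 1
        apply List.map_congr_left
        intro j _
        simp only [Function.comp_apply]
        congr 1
        push_cast
        ring
    · rw [dif_neg hlt]
      have h0 : n = 0 := by omega
      subst h0
      have h00 : List.range' 1 ((0 + 99) / 100) = [] := rfl
      rw [h00]
      simp

-- A's grown queue for one pair, in closed form
lemma fcq_grown_char (b e : Int) :
    (if e - b > 0 then fcqGrowUp e [b] b else fcqGrowDown e [b] b)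
      = (List.range (fcqL b e)).map (fcqFA b e) := by
  have hrange : ∀ k : Nat, List.range (k + 1) = 0 :: List.range' 1 k := by
    intro k
    rw [List.range_eq_range']
    simp [List.range']
  by_cases h : e - b > 0
  · rw [if_pos h, fcqGrowUp_char e ((e - b).toNat) [b] b (by omega) rfl]
    unfold fcqL
    have hd : (e - b).natAbs = (e - b).toNat := by omega
    rw [hd, hrange]
    simp only [List.map_cons]
    have h0 : fcqFA b e 0 = b := by unfold fcqFA; split <;> simp <;> omega
    rw [h0]
    simp only [List.cons_append, List.nil_append, List.cons.injEq, true_and]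
    apply List.map_congr_left
    intro j _
    unfold fcqFA
    rw [if_pos h]
  · rw [if_neg h, fcqGrowDown_char e ((b - e).toNat) [b] b (by omega) rfl]
    unfold fcqL
    have hd : (e - b).natAbs = (b - e).toNat := by omega
    rw [hd, hrange]
    simp only [List.map_cons]
    have h0 : fcqFA b e 0 = b := by unfold fcqFA; split <;> simp <;> omega
    rw [h0]
    simp only [List.cons_append, List.nil_append, List.cons.injEq, true_and]
    apply List.map_congr_left
    intro j _
    unfold fcqFA
    rw [if_neg h]

-- from index fcqL-1 on, the column is constantly e
lemma fcqFA_const (b e : Int) (i : Nat) (hi : fcqL b e - 1 ≤ i) : fcqFA b e i = e := by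
  unfold fcqL at hi
  have hmul : (e - b).natAbs ≤ i * 100 := by omega
  have hcast : ((e - b).natAbs : Int) ≤ (i : Int) * 100 := by exact_mod_cast hmul
  unfold fcqFA
  split <;> omega

-- one padded column of A equals the full closed-form column
lemma fcq_col_eq (b e : Int) (M : Nat) (hM : fcqL b e ≤ M) :
    (if ((((List.range (fcqL b e)).map (fcqFA b e)).length : Int)) < (M : Int) then
        ((List.range (fcqL b e)).map (fcqFA b e)) ++
          List.replicate (((M : Int) - (((List.range (fcqL b e)).map (fcqFA b e)).length : Int)).toNat)
            (PySem.List.pyGetD ((List.range (fcqL b e)).map (fcqFA b e)) (-1) 0)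
      else (List.range (fcqL b e)).map (fcqFA b e))
      = (List.range M).map (fcqFA b e) := by
  have hL1 : 1 ≤ fcqL b e := by unfold fcqL; omega
  have hlen : ((List.range (fcqL b e)).map (fcqFA b e)).length = fcqL b e := by simp
  have hlast : PySem.List.pyGetD ((List.range (fcqL b e)).map (fcqFA b e)) (-1) 0 = e := by
    have : fcqL b e = (fcqL b e - 1) + 1 := by omega
    rw [this, List.range_succ, List.map_append, List.map_cons, List.map_nil,
      PySem.List.pyGetD_neg_one_append_singleton]
    exact fcqFA_const b e (fcqL b e - 1) le_rfl
  rw [hlen, hlast]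
  by_cases hlt : fcqL b e < M
  · rw [if_pos (by exact_mod_cast hlt)]
    have hMsplit : M = fcqL b e + (M - fcqL b e) := by omega
    have hcnt : (((M : Int) - ((fcqL b e : Nat) : Int)).toNat) = M - fcqL b e := by omega
    rw [hcnt]
    conv_rhs => rw [hMsplit]
    rw [List.range_add, List.map_append, List.map_map]
    congr 1
    have : ∀ j ∈ List.range (M - fcqL b e), (fcqFA b e ∘ fun x => fcqL b e + x) j = e := by
      intro j _
      simp only [Function.comp_apply]
      exact fcqFA_const b e (fcqL b e + j) (by omega)
    rw [List.map_congr_left this]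
    simp
  · have hEq : fcqL b e = M := by omega
    rw [if_neg (by exact_mod_cast (by omega : ¬ ((fcqL b e : Int) < (M : Int)))), hEq]

-- B's per-pair length formula equals fcqL
lemma fcq_formula_eq (b e : Int) :
    PySem.Int.floordiv ((↑(e - b).natAbs : Int) + 100 - 1) 100 + 1 = ((fcqL b e : Nat) : Int) := by
  have h1 : ((↑(e - b).natAbs : Int) + 100 - 1) = (((e - b).natAbs + 99 : Nat) : Int) := by push_cast; ring
  rw [h1]
  have h2 : PySem.Int.floordiv (((e - b).natAbs + 99 : Nat) : Int) 100
      = ((((e - b).natAbs + 99) / 100 : Nat) : Int) := by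
    exact_mod_cast PySem.Int.floordiv_natCast ((e - b).natAbs + 99) 100
  rw [h2]
  unfold fcqL
  push_cast
  ring

theorem fill_coords_queue_main (coords : List (Int × Int)) (hpre : coords ≠ []) :
    fill_coords_queue coords = fill_coords_queue_alt coords := by
  unfold fill_coords_queue fill_coords_queue_alt
  simp only [List.zipWith_map_right, List.zipWith_self]
  -- the grown queues in closed form
  have hgrow : (coords.map (fun p : Int × Int =>
      if p.2 - p.1 > 0 then fcqGrowUp p.2 [p.1] (PySem.List.pyGetD [p.1] (-1) 0)
      else fcqGrowDown p.2 [p.1] (PySem.List.pyGetD [p.1] (-1) 0)))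
      = coords.map (fun p : Int × Int => (List.range (fcqL p.1 p.2)).map (fcqFA p.1 p.2)) := by
    apply List.map_congr_left
    intro p _
    have hget : PySem.List.pyGetD [p.1] (-1) 0 = p.1 := by
      have := PySem.List.pyGetD_neg_one_append_singleton ([] : List Int) p.1 0
      simpa using this
    rw [hget]
    exact fcq_grown_char p.1 p.2
  rw [hgrow]
  -- both max?-lists are the list of cast fcqL values
  have hlenlist : (coords.map (fun p : Int × Int => (List.range (fcqL p.1 p.2)).map (fcqFA p.1 p.2))).map
      (fun q => PySem.List.len q)
      = coords.map (fun p : Int × Int => ((fcqL p.1 p.2 : Nat) : Int)) := by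
    rw [List.map_map]
    apply List.map_congr_left
    intro p _
    simp [PySem.List.len_eq]
  have hblist : coords.map (fun p : Int × Int =>
        PySem.Int.floordiv ((↑(p.2 - p.1).natAbs : Int) + 100 - 1) 100 + 1)
      = coords.map (fun p : Int × Int => ((fcqL p.1 p.2 : Nat) : Int)) := by
    apply List.map_congr_left
    intro p _
    exact fcq_formula_eq p.1 p.2
  rw [hlenlist, hblist]
  -- the shared maximum
  obtain ⟨m, hm⟩ : ∃ m, PySem.List.max? (coords.map (fun p : Int × Int => ((fcqL p.1 p.2 : Nat) : Int)))
      (fun x => x) = some m := by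
    cases hmx : PySem.List.max? (coords.map (fun p : Int × Int => ((fcqL p.1 p.2 : Nat) : Int))) (fun x => x) with
    | none =>
      rw [PySem.List.max?_eq_none_iff] at hmx
      simp only [List.map_eq_nil_iff] at hmx
      exact absurd hmx hpre
    | some m => exact ⟨m, rfl⟩
  rw [hm]
  simp only [Option.getD_some]
  have hmem := PySem.List.max?_mem hm
  simp only [List.mem_map] at hmem
  obtain ⟨p0, _, hp0⟩ := hmem
  have hm1 : 1 ≤ m := by
    have : 1 ≤ fcqL p0.1 p0.2 := by unfold fcqL; omega
    omega
  have hmax := PySem.List.max?_isMax hm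
  have hmnat : m = ((m.toNat : Nat) : Int) := by omega
  -- columns coincide
  congr 1
  rw [List.map_map]
  apply List.map_congr_left
  intro p hp
  have hle : fcqL p.1 p.2 ≤ m.toNat := by
    have := hmax ((fcqL p.1 p.2 : Nat) : Int) (List.mem_map_of_mem hp)
    omega
  have hcol := fcq_col_eq p.1 p.2 m.toNat hle
  simp only [List.length_map, List.length_range] at hcol
  rw [hmnat]
  simp only [Function.comp_apply, PySem.List.len_eq, List.length_map, List.length_range]
  rw [hcol, PySem.List.pyRange_zero_natCast, List.map_map]
  apply List.map_congr_left
  intro j _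
  simp only [Function.comp_apply]
  rw [fcqFA_eq_fcqFB]
  rfl

-- ===== VERDICT (by name: the statement is the Claim_ definition above) =====
theorem fill_coords_queue_spec : Claim_equal_fill_coords_queue := by
  intro coords _dom hpre
  unfold Spec_fill_coords_queue
  exact fill_coords_queue_main coords hpre
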